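-- pv_equiv track=rewrite | github.com/mario-bermonti/wdiff | wanalysis.py | has_silent_u
-- ===== SOURCE A (Python) =====
-- def has_silent_u(word):
--     """Determines the occurences of silent u's in the word based on the
--     spanish language rules.
--
--     returns: the number of silent u's in the word.
--     """
--
--     silentuCount = 0
--
--     if "u" in word:
--         uCount = word.count("u")
--         start = 0
--
--         while uCount > 0:
--             uPosition = word.find("u", start)
--             if ((word[uPosition-1] == "q" or word[uPosition-1] == 'g') and
--                     (word[uPosition+1] == "e" or word[uPosition+1] == "i")):
--                 silentuCount += 1
--             uCount -= 1
--             start = uPosition + 1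
--
--     return silentuCount
-- ===== SOURCE B (Python) =====
-- def has_silent_u(word):
--     """Number of silent u's (u after q/g and before e/i) in the word."""
--     return sum(
--         1
--         for i, ch in enumerate(word)
--         if ch == "u"
--         and 0 < i
--         and i + 1 < len(word)
--         and word[i - 1] in "qg"
--         and word[i + 1] in "ei"
--     )
-- ===== Notes on version B (the rewrite author's own statement) =====
-- stated objective: simpler
-- what changed: Replaces A's count/find bookkeeping (a u-counter, a moving find start, a while loop) by a single guarded comprehension pass over enumerate(word), counting each u whose in-range neighbours are q/g before and e/i after.
-- intended difference: On words whose first letter is a u followed by e/i and whose last letter is q/g (witness 'uiq'), A's negative indexing word[uPosition-1] wraps around to the end of the word and counts that word-initial u (A returns 1 on 'uiq'), while B returns 0, the intended count since a word-initial u has no preceding letter. — e.g. on has_silent_u("uiq"): A returns 1, B returns 0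
import Mathlib
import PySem

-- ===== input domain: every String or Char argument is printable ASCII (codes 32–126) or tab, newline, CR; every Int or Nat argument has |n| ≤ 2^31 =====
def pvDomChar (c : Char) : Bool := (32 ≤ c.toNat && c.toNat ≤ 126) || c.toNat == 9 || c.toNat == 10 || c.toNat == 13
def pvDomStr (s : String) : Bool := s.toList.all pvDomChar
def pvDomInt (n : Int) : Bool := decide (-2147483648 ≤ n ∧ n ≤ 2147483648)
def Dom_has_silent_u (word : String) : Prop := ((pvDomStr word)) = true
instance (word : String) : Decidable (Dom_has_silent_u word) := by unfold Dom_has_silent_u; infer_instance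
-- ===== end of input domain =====

-- B replaces A's count/find scanning loop by a single guarded pass over enumerate(word); objective: simpler.
-- A raises IndexError when the word ends in "qu"/"gu" (excluded by Pre_); on words starting with a u that A's
-- negative-index wraparound wrongly counts, B returns the intended count (see D_).

-- ===== PORT A =====
def hsuLoop (l : List Char) : Nat → Int → Int → Int
  | 0, _, acc => acc
  | n + 1, start, acc =>
    let uPos := PySem.Chars.findFrom l ['u'] start
    let acc' :=
      if PySem.List.pyGet? l (uPos - 1) = some 'q' ∨ PySem.List.pyGet? l (uPos - 1) = some 'g' then
        -- word[uPos+1] raises IndexError in Python when out of range; those inputs are outside Pre_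
        if PySem.List.pyGet? l (uPos + 1) = some 'e' ∨ PySem.List.pyGet? l (uPos + 1) = some 'i' then
          acc + 1
        else acc
      else acc
    hsuLoop l n (uPos + 1) acc'

def has_silent_u (word : String) : Int :=
  if PySem.Str.isIn "u" word then
    hsuLoop word.toList (PySem.Str.count word "u") 0 0
  else 0

-- ===== PORT B =====
-- the filter condition of Source B's generator expression
def hsuCond (l : List Char) (p : Int × Char) : Bool :=
  p.2 == 'u' && decide (0 < p.1) && decide (p.1 + 1 < (l.length : Int)) &&
  (PySem.List.pyGet? l (p.1 - 1) == some 'q' || PySem.List.pyGet? l (p.1 - 1) == some 'g') &&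
  (PySem.List.pyGet? l (p.1 + 1) == some 'e' || PySem.List.pyGet? l (p.1 + 1) == some 'i')

def has_silent_u_alt (word : String) : Int :=
  let l := word.toList
  (((PySem.List.enumerate l).filter (hsuCond l)).map (fun _ => (1 : Int))).sum

-- ===== PRECONDITION & SPEC =====
-- Pre_ excludes exactly the inputs on which A raises IndexError: words whose last character is a u
-- preceded by q or g (the short-circuited word[uPosition+1] runs off the end of the word there).
def Pre_has_silent_u (word : String) : Prop :=
  ¬ (2 ≤ word.toList.length ∧ word.toList.getLast? = some 'u' ∧
     (word.toList[word.toList.length - 2]? = some 'q' ∨ word.toList[word.toList.length - 2]? = some 'g'))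
instance (word : String) : Decidable (Pre_has_silent_u word) := by unfold Pre_has_silent_u; infer_instance
def pvWitness_has_silent_u : String := "queso"

-- On words whose FIRST letter is a u followed by e/i and whose LAST letter is q/g, A's negative
-- indexing word[uPosition-1] wraps around to the end and counts that initial u (witness "uiq" -> 1), which no
-- Spanish-orthography reading supports; B does not count a word-initial u, the intended behaviour.
def D_has_silent_u (word : String) : Prop :=
  word.toList[0]? = some 'u' ∧
  (word.toList.getLast? = some 'q' ∨ word.toList.getLast? = some 'g') ∧
  (word.toList[1]? = some 'e' ∨ word.toList[1]? = some 'i')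
instance (word : String) : Decidable (D_has_silent_u word) := by unfold D_has_silent_u; infer_instance

def Spec_has_silent_u (word : String) (out : Int) : Prop := ¬ D_has_silent_u word → out = has_silent_u_alt word
instance (word : String) (out : Int) : Decidable (Spec_has_silent_u word out) := by unfold Spec_has_silent_u; infer_instance

def pvDiffWitness_has_silent_u : String := "uiq"
def pvDiffWitnessOut_has_silent_u : Int × Int := (1, 0)

-- ===== CLAIM (what is proved, stated in full; the proofs are below) =====
def Claim_unchanged_has_silent_u : Prop := ∀ (word : String), Dom_has_silent_u word → Pre_has_silent_u word → Spec_has_silent_u word (has_silent_u word)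
def Claim_changed_has_silent_u : Prop := Dom_has_silent_u (pvDiffWitness_has_silent_u) ∧ Pre_has_silent_u (pvDiffWitness_has_silent_u) ∧ D_has_silent_u (pvDiffWitness_has_silent_u) ∧ has_silent_u (pvDiffWitness_has_silent_u) = pvDiffWitnessOut_has_silent_u.1 ∧ has_silent_u_alt (pvDiffWitness_has_silent_u) = pvDiffWitnessOut_has_silent_u.2 ∧ pvDiffWitnessOut_has_silent_u.1 ≠ pvDiffWitnessOut_has_silent_u.2
def Claim_exact_has_silent_u : Prop := ∀ (word : String), Dom_has_silent_u word → Pre_has_silent_u word → D_has_silent_u word → has_silent_u word ≠ has_silent_u_alt word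

-- ===== LEMMAS AND PROOFS =====

-- A's per-u test, as a Bool (same tests, same short-circuit order as the nested ifs in hsuLoop)
def cA (l : List Char) (i : Int) : Bool :=
  (PySem.List.pyGet? l (i - 1) == some 'q' || PySem.List.pyGet? l (i - 1) == some 'g') &&
  (PySem.List.pyGet? l (i + 1) == some 'e' || PySem.List.pyGet? l (i + 1) == some 'i')

-- per-index contributions of A and of B
def gA (l : List Char) (i : Nat) : Int :=
  if l[i]? = some 'u' then (if cA l (i : Int) then 1 else 0) else 0

def gB (l : List Char) (i : Nat) : Int :=
  match l[i]? with
  | some c => if hsuCond l ((i : Int), c) then 1 else 0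
  | none => 0

lemma step_eq (l : List Char) (u acc : Int) :
    (if PySem.List.pyGet? l (u - 1) = some 'q' ∨ PySem.List.pyGet? l (u - 1) = some 'g' then
       (if PySem.List.pyGet? l (u + 1) = some 'e' ∨ PySem.List.pyGet? l (u + 1) = some 'i' then
          acc + 1 else acc)
     else acc) = acc + (if cA l u then 1 else 0) := by
  simp only [cA]
  split_ifs with h1 h2 <;> simp_all

lemma singleton_prefix_iff (c : Char) (l : List Char) : [c] <+: l ↔ l.head? = some c := by
  constructor
  · rintro ⟨t, rfl⟩; rfl
  · intro h
    cases l with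
    | nil => simp at h
    | cons a t => simp at h; exact ⟨t, by simp [h]⟩

lemma u_at (l : List Char) (j : Nat) : ['u'] <+: l.drop j ↔ l[j]? = some 'u' := by
  rw [singleton_prefix_iff, List.head?_drop]

lemma count_go_singleton (c : Char) :
    ∀ (fuel : Nat) (l : List Char) (acc : Nat), l.length ≤ fuel →
      PySem.Chars.count.go [c] fuel l acc = acc + l.count c := by
  intro fuel
  induction fuel with
  | zero =>
    intro l acc h
    cases l with
    | nil => simp [PySem.Chars.count.go]
    | cons a t => simp at h
  | succ n ih =>
    intro l acc h
    cases l with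
    | nil => simp [PySem.Chars.count.go]
    | cons a t =>
      have ht : t.length ≤ n := by simp at h; omega
      by_cases hc : c = a
      · subst hc
        have hp : List.isPrefixOf [c] (c :: t) = true := by simp [List.isPrefixOf]
        simp only [PySem.Chars.count.go, hp, if_pos, List.length_cons, List.length_nil,
          Nat.zero_add, List.drop_one, List.tail_cons]
        rw [ih t (acc + 1) ht]
        simp [List.count_cons]
        omega
      · have hp : List.isPrefixOf [c] (a :: t) = false := by
          simp [List.isPrefixOf]
          first
          | exact hc
          | exact Ne.symm hc
        simp only [PySem.Chars.count.go, hp]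
        rw [ih t acc ht]
        have hca : a ≠ c := Ne.symm hc
        simp [List.count_cons, hca]

lemma count_singleton (l : List Char) (c : Char) :
    PySem.Chars.count l [c] = l.count c := by
  simp only [PySem.Chars.count, List.isEmpty_cons, Bool.false_eq_true, if_false]
  simpa using count_go_singleton c l.length l 0 le_rfl

-- A's while loop computes the sum of the per-u contributions gA over [k, length)
lemma loopA (l : List Char) :
    ∀ (n k : Nat) (acc : Int), k ≤ l.length → (l.drop k).count 'u' = n →
      hsuLoop l n ((k : Nat) : Int) acc = acc + ∑ i ∈ Finset.Ico k l.length, gA l i := by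
  intro n
  induction n with
  | zero =>
    intro k acc hk hcnt
    have hnone : ∀ i ∈ Finset.Ico k l.length, gA l i = 0 := by
      intro i hi
      rw [Finset.mem_Ico] at hi
      have hnotmem : 'u' ∉ l.drop k := by
        intro hm
        have := List.count_pos_iff.mpr hm
        omega
      unfold gA
      rw [if_neg]
      intro hsome
      apply hnotmem
      have : (l.drop k)[i - k]? = some 'u' := by
        rw [List.getElem?_drop]
        rwa [Nat.add_sub_cancel' hi.1]
      exact List.mem_of_getElem? this
    rw [Finset.sum_eq_zero hnone]
    simp [hsuLoop]
  | succ n ih =>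
    intro k acc hk hcnt
    -- there is a 'u' at or after k; find it
    have hmem : 'u' ∈ l.drop k := by
      apply List.count_pos_iff.mp
      omega
    have hinf : ['u'] <:+: l.drop k := (List.singleton_infix_iff 'u' (l.drop k)).mpr hmem
    have hfind : 0 ≤ PySem.Chars.find (l.drop k) ['u'] :=
      (PySem.Chars.find_nonneg_iff _ _).mpr hinf
    set j : Nat := (PySem.Chars.find (l.drop k) ['u']).toNat with hj
    obtain ⟨hpre, hmin⟩ := PySem.Chars.find_spec (s := l.drop k) (sub := ['u']) hfind
    have hup : l[k + j]? = some 'u' := by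
      rw [← u_at]
      rwa [List.drop_drop] at hpre
    have hplen : k + j < l.length := by
      by_contra hge
      rw [List.getElem?_eq_none (by omega)] at hup
      simp at hup
    have hnou : ∀ m, k ≤ m → m < k + j → l[m]? ≠ some 'u' := by
      intro m hm1 hm2 hsome
      apply hmin (m - k) (by omega)
      rw [List.drop_drop, Nat.add_sub_cancel' hm1]
      rw [u_at]
      exact hsome
    -- findFrom returns k + j
    have hff : PySem.Chars.findFrom l ['u'] ((k : Nat) : Int) = ((k + j : Nat) : Int) := by
      rw [PySem.Chars.findFrom_natCast l ['u'] k hk]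
      rw [if_neg (by omega)]
      push_cast
      omega
    -- the count of the tail
    have hdropsucc : l.drop (k + j) = 'u' :: l.drop (k + j + 1) := by
      have := List.getElem?_eq_some_iff.mp hup
      obtain ⟨h1, h2⟩ := this
      rw [List.drop_eq_getElem_cons h1, h2]
    have hcnt' : (l.drop (k + j + 1)).count 'u' = n := by
      have htk : 'u' ∉ (l.drop k).take j := by
        intro hm
        obtain ⟨m, hmlt, hgm⟩ := List.getElem_of_mem hm
        have hmj : m < j := lt_of_lt_of_le hmlt (by simpa using List.length_take_le j (l.drop k))
        rw [List.getElem_take] at hgm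
        have : l[k + m]? = some 'u' := by
          have hmk : m < (l.drop k).length := by
            simp only [List.length_drop]; omega
          have : (l.drop k)[m]? = some 'u' := by
            rw [List.getElem?_eq_some_iff]; exact ⟨hmk, hgm⟩
          rwa [List.getElem?_drop] at this
        exact hnou (k + m) (by omega) (by omega) this
      have hdecomp : l.drop k = (l.drop k).take j ++ ('u' :: l.drop (k + j + 1)) := by
        conv_lhs => rw [← List.take_append_drop j (l.drop k)]
        rw [List.drop_drop, hdropsucc]
      rw [hdecomp] at hcnt
      simp [List.count_append, List.count_cons, List.count_eq_zero.mpr htk] at hcnt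
      omega
    -- one step of hsuLoop
    show hsuLoop l (n + 1) ((k : Nat) : Int) acc = _
    rw [hsuLoop]
    simp only [hff, step_eq]
    have hcast : ((k + j : Nat) : Int) + 1 = ((k + j + 1 : Nat) : Int) := by push_cast; ring
    rw [hcast]
    rw [ih (k + j + 1) _ (by omega) hcnt']
    have hgAp : gA l (k + j) = if cA l ((k + j : Nat) : Int) then 1 else 0 := by
      unfold gA; rw [if_pos hup]
    -- split the sum
    have hzero : ∀ i ∈ Finset.Ico k (k + j), gA l i = 0 := by
      intro i hi
      rw [Finset.mem_Ico] at hi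
      unfold gA
      rw [if_neg (hnou i hi.1 hi.2)]
    have hs1 : ∑ i ∈ Finset.Ico k l.length, gA l i
        = ∑ i ∈ Finset.Ico k (k + j), gA l i + ∑ i ∈ Finset.Ico (k + j) l.length, gA l i := by
      rw [Finset.sum_Ico_consecutive _ (by omega) (by omega)]
    have hs2 : ∑ i ∈ Finset.Ico (k + j) l.length, gA l i
        = gA l (k + j) + ∑ i ∈ Finset.Ico (k + j + 1) l.length, gA l i := by
      rw [← Finset.sum_Ico_consecutive (fun i => gA l i) (show k + j ≤ k + j + 1 by omega) (by omega)]
      rw [Finset.sum_Ico_succ_top (by omega)]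
      simp
    rw [hs1, hs2, Finset.sum_eq_zero hzero, hgAp]
    ring

-- B is the sum of the per-index contributions gB
lemma loopB_aux (L : List Char) :
    ∀ (l : List Char) (s : Nat),
      (((PySem.List.enumerate l ((s : Nat) : Int)).filter (hsuCond L)).map (fun _ => (1 : Int))).sum
        = ∑ k ∈ Finset.range l.length,
            (match l[k]? with
             | some c => if hsuCond L (((s + k : Nat) : Int), c) then 1 else 0
             | none => 0) := by
  intro l
  induction l with
  | nil => intro s; simp [PySem.List.enumerate_nil]
  | cons a t ih =>
    intro s
    rw [PySem.List.enumerate_cons]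
    rw [show (a :: t).length = t.length + 1 from rfl, Finset.sum_range_succ']
    have hcast : ((s : Nat) : Int) + 1 = ((s + 1 : Nat) : Int) := by push_cast; ring
    by_cases h : hsuCond L (((s : Nat) : Int), a)
    · rw [List.filter_cons_of_pos h]
      simp only [List.map_cons, List.sum_cons]
      rw [hcast, ih (s + 1)]
      simp only [List.getElem?_cons_succ, List.getElem?_cons_zero]
      have : ∀ i, (s + 1) + i = s + (i + 1) := by omega
      simp only [this, Nat.add_zero]
      rw [if_pos h]
      ring
    · rw [List.filter_cons_of_neg h]
      rw [hcast, ih (s + 1)]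
      simp only [List.getElem?_cons_succ, List.getElem?_cons_zero]
      have : ∀ i, (s + 1) + i = s + (i + 1) := by omega
      simp only [this, Nat.add_zero]
      rw [if_neg h]
      ring

lemma B_eq_sum (word : String) :
    has_silent_u_alt word = ∑ i ∈ Finset.range word.toList.length, gB word.toList i := by
  unfold has_silent_u_alt
  have h0 : (0 : Int) = ((0 : Nat) : Int) := rfl
  rw [h0, loopB_aux word.toList word.toList 0]
  apply Finset.sum_congr rfl
  intro i _
  unfold gB
  simp

lemma A_eq_sum (word : String) :
    has_silent_u word = ∑ i ∈ Finset.range word.toList.length, gA word.toList i := by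
  unfold has_silent_u
  by_cases h : PySem.Str.isIn "u" word = true
  · rw [if_pos h]
    have hc : PySem.Str.count word "u" = (word.toList.drop 0).count 'u' := by
      have : PySem.Str.count word "u" = PySem.Chars.count word.toList "u".toList := by
        simp [PySem.Str.count_eq]
      rw [this]
      have hu : "u".toList = ['u'] := by decide
      rw [hu, count_singleton]
      simp
    have hA := loopA word.toList _ 0 0 (Nat.zero_le _) rfl
    simp only [Nat.cast_zero] at hA
    rw [hc, hA, Finset.range_eq_Ico]
    ring
  · rw [if_neg h]
    have hnot : 'u' ∉ word.toList := by
      intro hm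
      apply h
      rw [PySem.Str.isIn_eq]
      have hu : "u".toList = ['u'] := by decide
      rw [hu]
      exact (PySem.Chars.isIn_iff_infix _ _).mpr ((List.singleton_infix_iff _ _).mpr hm)
    symm
    apply Finset.sum_eq_zero
    intro i _
    unfold gA
    rw [if_neg]
    intro hsome
    exact hnot (List.mem_of_getElem? hsome)

-- pointwise agreement of the two contributions away from index 0
lemma point_pos (l : List Char) (i : Nat) (hi : 0 < i) : gA l i = gB l i := by
  unfold gA gB
  cases hl : l[i]? with
  | none => simp
  | some c =>
    by_cases hu : c = 'u'
    · subst hu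
      simp only [if_pos rfl]
      have hlen : i < l.length := (List.getElem?_eq_some_iff.mp hl).1
      have hprev : PySem.List.pyGet? l ((i : Int) - 1) = l[i - 1]? := by
        have : (i : Int) - 1 = ((i - 1 : Nat) : Int) := by omega
        rw [this, PySem.List.pyGet?_natCast]
      have hnext : PySem.List.pyGet? l ((i : Int) + 1) = l[i + 1]? := by
        have : (i : Int) + 1 = ((i + 1 : Nat) : Int) := by push_cast; ring
        rw [this, PySem.List.pyGet?_natCast]
      by_cases hend : i + 1 < l.length
      · unfold cA hsuCond
        simp only [hprev, hnext]
        have h1 : decide (0 < (i : Int)) = true := by simp; omega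
        have h2 : decide ((i : Int) + 1 < (l.length : Int)) = true := by simp; omega
        simp [h1, h2, hi]
      · have hnone : l[i + 1]? = none := List.getElem?_eq_none (by omega)
        unfold cA hsuCond
        simp only [hprev, hnext, hnone]
        have h2 : decide ((i : Int) + 1 < (l.length : Int)) = false := by simp; omega
        simp [h2]
    · have hA : (some c = some 'u') = False := by simp [hu]
      simp only [hA, if_false]
      unfold hsuCond
      simp [hu]

-- at index 0, B never counts
lemma gB_zero (l : List Char) : gB l 0 = 0 := by
  unfold gB
  cases hl : l[0]? with
  | none => rfl
  | some c =>
    unfold hsuCond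
    simp

-- at index 0, A counts exactly on D (stated on the list side)
lemma gA_zero (word : String) :
    gA word.toList 0 = if D_has_silent_u word then 1 else 0 := by
  unfold gA D_has_silent_u
  by_cases h0 : word.toList[0]? = some 'u'
  · rw [if_pos h0]
    have hprev : PySem.List.pyGet? word.toList (((0 : Nat) : Int) - 1) = word.toList.getLast? := by
      norm_num [PySem.List.pyGet?_neg_one]
    have hnext : PySem.List.pyGet? word.toList (((0 : Nat) : Int) + 1) = word.toList[1]? := by
      rw [show ((0 : Nat) : Int) + 1 = ((1 : Nat) : Int) by norm_num, PySem.List.pyGet?_natCast]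
    unfold cA
    rw [hprev, hnext]
    by_cases hq : word.toList.getLast? = some 'q' ∨ word.toList.getLast? = some 'g'
    · by_cases he : word.toList[1]? = some 'e' ∨ word.toList[1]? = some 'i'
      · rcases hq with hq | hq <;> rcases he with he | he <;> simp [h0, hq, he]
      · have he1 : word.toList[1]? ≠ some 'e' := fun hh => he (Or.inl hh)
        have he2 : word.toList[1]? ≠ some 'i' := fun hh => he (Or.inr hh)
        simp [h0, he1, he2]
    · have hq1 : word.toList.getLast? ≠ some 'q' := fun hh => hq (Or.inl hh)
      have hq2 : word.toList.getLast? ≠ some 'g' := fun hh => hq (Or.inr hh)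
      simp [h0, hq1, hq2]
  · rw [if_neg h0, if_neg (by tauto)]

lemma sum_split_zero (word : String) :
    ∑ i ∈ Finset.range word.toList.length, gA word.toList i
      = gA word.toList 0 - gB word.toList 0
        + ∑ i ∈ Finset.range word.toList.length, gB word.toList i := by
  cases hl : word.toList.length with
  | zero =>
    have hnil : word.toList = [] := List.length_eq_zero_iff.mp hl
    simp [gA, gB, hnil]
  | succ n =>
    rw [Finset.sum_range_succ' (gA word.toList), Finset.sum_range_succ' (gB word.toList)]
    have : ∀ i ∈ Finset.range n, gA word.toList (i + 1) = gB word.toList (i + 1) := by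
      intro i _
      exact point_pos word.toList (i + 1) (Nat.succ_pos i)
    rw [Finset.sum_congr rfl this]
    ring

lemma A_sub_B (word : String) :
    has_silent_u word = (if D_has_silent_u word then 1 else 0) + has_silent_u_alt word := by
  rw [A_eq_sum, B_eq_sum, sum_split_zero, gA_zero, gB_zero]
  ring

-- ===== VERDICT (by name: the statement is the Claim_ definition above) =====
theorem has_silent_u_spec : Claim_unchanged_has_silent_u := by
  intro word _ _ hD
  rw [A_sub_B, if_neg hD]
  ring

theorem has_silent_u_changed : Claim_changed_has_silent_u := by
  unfold Claim_changed_has_silent_u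
  decide

theorem has_silent_u_tight : Claim_exact_has_silent_u := by
  intro word _ _ hD
  rw [A_sub_B, if_pos hD]
  omega
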